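-- pv_equiv track=rewrite | github.com/zliu53468-ai/BGS0.3V.1 | br_features.py | run_hist
-- ===== SOURCE A (Python) =====
-- from typing import Any, Dict, List, Tuple
--
-- def run_hist(seq_bp: List[str]) -> Dict[int, int]:
--     hist: Dict[int,int] = {}
--     if not seq_bp: return hist
--     cur = 1
--     for i in range(1, len(seq_bp)):
--         if seq_bp[i] == seq_bp[i-1]:
--             cur += 1
--         else:
--             hist[cur] = hist.get(cur, 0) + 1
--             cur = 1
--     hist[cur] = hist.get(cur, 0) + 1
--     return hist
-- ===== SOURCE B (Python) =====
-- from typing import Dict, List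
--
-- def run_hist(seq_bp: List[str]) -> Dict[int, int]:
--     if not seq_bp:
--         return {}
--     n = len(seq_bp)
--     # staged: (1) boundary indices where a new run starts, (2) run lengths as
--     # pairwise differences of the boundary list, (3) one count() per distinct length
--     edges = [0] + [i for i in range(1, n) if seq_bp[i] != seq_bp[i - 1]] + [n]
--     lengths = [b - a for a, b in zip(edges, edges[1:])]
--     return {L: lengths.count(L) for L in dict.fromkeys(lengths)}
-- ===== Notes on version B (the rewrite author's own statement) =====
-- stated objective: alternative
-- what changed: A's single stateful pass (running run counter + incremental dict tally) is replaced by three stages: collect the boundary indices where a new run starts, obtain run lengths as pairwise differences of that boundary list, then build the histogram with one list.count per distinct length (no incremental counting at all).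
import Mathlib
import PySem

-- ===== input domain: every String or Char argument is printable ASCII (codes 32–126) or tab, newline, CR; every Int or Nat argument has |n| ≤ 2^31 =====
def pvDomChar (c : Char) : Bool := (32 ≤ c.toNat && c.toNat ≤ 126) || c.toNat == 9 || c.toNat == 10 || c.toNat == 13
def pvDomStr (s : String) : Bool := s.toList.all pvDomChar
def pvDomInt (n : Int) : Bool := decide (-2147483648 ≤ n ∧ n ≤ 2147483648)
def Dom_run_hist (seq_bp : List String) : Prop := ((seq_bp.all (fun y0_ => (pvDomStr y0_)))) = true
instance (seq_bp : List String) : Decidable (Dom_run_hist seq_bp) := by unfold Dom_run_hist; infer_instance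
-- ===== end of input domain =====

-- B replaces A's single stateful pass (running run counter + incremental tally) by three stages:
-- run-boundary indices, run lengths as pairwise differences, then one count per distinct length; objective: alternative.

-- ===== PORT A =====
-- literal port: index loop over range(1, len), state (hist, cur); final hist[cur] increment
def run_hist (seq_bp : List String) : List (Int × Int) :=
  let hist : PySem.Dict Int Int := PySem.Dict.empty
  if seq_bp = [] then hist.items
  else
    let st :=
      (PySem.List.pyRange 1 (PySem.List.len seq_bp) 1).foldl
        (fun (st : PySem.Dict Int Int × Int) i =>
          if PySem.List.pyGetD seq_bp i "" = PySem.List.pyGetD seq_bp (i - 1) "" then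
            (st.1, st.2 + 1)
          else
            (st.1.insert st.2 (st.1.getD st.2 0 + 1), 1))
        (hist, 1)
    (st.1.insert st.2 (st.1.getD st.2 0 + 1)).items

-- ===== PORT B =====
-- literal port of Source B: edges = [0] + boundary indices + [n]; lengths = pairwise diffs
-- (edges[1:] is PySem.List.slice); dict comprehension over dict.fromkeys (= PySem.List.dedup)
-- with lengths.count (= PySem.List.count)
def run_hist_alt (seq_bp : List String) : List (Int × Int) :=
  if seq_bp = [] then (PySem.Dict.empty : PySem.Dict Int Int).items
  else
    let n := PySem.List.len seq_bp
    let edges : List Int :=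
      0 :: (PySem.List.pyRange 1 n 1).filter
        (fun i => !(PySem.List.pyGetD seq_bp i "" == PySem.List.pyGetD seq_bp (i - 1) "")) ++ [n]
    let lengths := (edges.zip (PySem.List.slice edges (some 1) none)).map (fun p => p.2 - p.1)
    ((PySem.List.dedup lengths).foldl
        (fun (d : PySem.Dict Int Int) L => d.insert L ((PySem.List.count lengths L : Int)))
        PySem.Dict.empty).items

-- ===== PRECONDITION & SPEC =====
def Spec_run_hist (seq_bp : List String) (out : List (Int × Int)) : Prop := out = run_hist_alt seq_bp
instance (seq_bp : List String) (out : List (Int × Int)) : Decidable (Spec_run_hist seq_bp out) := by unfold Spec_run_hist; infer_instance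

-- ===== CLAIM (what is proved, stated in full; the proofs are below) =====
def Claim_equal_run_hist : Prop := ∀ (seq_bp : List String), Dom_run_hist seq_bp → Spec_run_hist seq_bp (run_hist seq_bp)

-- ===== LEMMAS AND PROOFS =====

-- A's loop step on the pair (previous element, current element)
def pvStep (st : PySem.Dict Int Int × Int) (p : String × String) : PySem.Dict Int Int × Int :=
  if p.2 = p.1 then (st.1, st.2 + 1)
  else (st.1.insert st.2 (st.1.getD st.2 0 + 1), 1)

-- A's trailing hist[cur] = hist.get(cur, 0) + 1
def pvFinish (st : PySem.Dict Int Int × Int) : PySem.Dict Int Int := st.1.insert st.2 (st.1.getD st.2 0 + 1)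

-- run lengths of (x repeated n times) ++ ys, the shared reference point of both proofs
def pvRunLengths : String → Int → List String → List Int
  | _, n, [] => [n]
  | x, n, y :: ys => if y = x then pvRunLengths x (n + 1) ys else n :: pvRunLengths y 1 ys

-- positions (offset o = position of the first element of xs) at which a new run starts in x :: xs
def pvPos : String → List String → Int → List Int
  | _, [], _ => []
  | x, y :: ys, o => if y = x then pvPos y ys (o + 1) else o :: pvPos y ys (o + 1)

-- B's pairwise differences
def pvDiffs (l : List Int) : List Int := (l.zip l.tail).map (fun p => p.2 - p.1)

-- A's index loop over range(1, len) reads the adjacent pairs (seq[i-1], seq[i]): it is the fold of pvStep over seq.zip seq.tail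
theorem pv_fold_adj (seq : List String) (init : PySem.Dict Int Int × Int) :
    (PySem.List.pyRange 1 (PySem.List.len seq) 1).foldl
        (fun st i =>
          if PySem.List.pyGetD seq i "" = PySem.List.pyGetD seq (i - 1) "" then (st.1, st.2 + 1)
          else (st.1.insert st.2 (st.1.getD st.2 0 + 1), 1)) init
      = (seq.zip seq.tail).foldl pvStep init := by
  cases seq with
  | nil => simp [PySem.List.pyRange_one_eq_nil, PySem.List.len]
  | cons x xs =>
    rw [List.tail_cons, ← PySem.List.foldl_pyRange_zero_pyGetD ((x :: xs).zip xs) ("", "") pvStep init]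
    rw [PySem.List.pyRange_one, PySem.List.pyRange_one]
    rw [List.foldl_map, List.foldl_map]
    have hlen1 : ((PySem.List.len (x :: xs)) - 1).toNat = xs.length := by
      simp [PySem.List.len]
    have hlen2 : ((PySem.List.len ((x :: xs).zip xs)) - 0).toNat = xs.length := by
      simp [PySem.List.len]
    rw [hlen1, hlen2]
    apply PySem.List.foldl_congr_mem
    intro st k hk
    have hk' : k < xs.length := List.mem_range.mp hk
    have e1 : (1 : Int) + ↑k - 1 = (↑k : Int) := by ring
    have e2 : (1 : Int) + ↑k = ((k + 1 : Nat) : Int) := by push_cast; ring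
    rw [e1, e2, PySem.List.pyGetD_natCast, PySem.List.pyGetD_natCast]
    have e3 : (0 : Int) + ↑k = ((k : Nat) : Int) := by norm_num
    rw [e3, PySem.List.pyGetD_natCast]
    have hz : ((x :: xs).zip xs).getD k ("", "") = ((x :: xs).getD k "", xs.getD k "") := by
      rw [List.getD_eq_getElem _ _ (by simp; omega), List.getD_eq_getElem _ _ (by simp; omega),
        List.getD_eq_getElem _ _ hk', List.getElem_zip]
    rw [hz, pvStep]
    simp

-- core invariant of A: the pair fold with pending run (value x, count n), then pvFinish,
-- equals the insert-counting fold of the run lengths pvRunLengths x n xs over the same dict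
theorem pv_main (xs : List String) : ∀ (x : String) (n : Int) (d : PySem.Dict Int Int),
    pvFinish (((x :: xs).zip xs).foldl pvStep (d, n))
      = (pvRunLengths x n xs).foldl (fun d v => d.insert v (d.getD v 0 + 1)) d := by
  induction xs with
  | nil => intro x n d; rfl
  | cons y ys ih =>
    intro x n d
    rw [List.zip_cons_cons, List.foldl_cons, pvRunLengths]
    by_cases h : y = x
    · simp [pvStep, h, ih]
    · simp [pvStep, h, ih, List.foldl_cons]

-- shifting the offset through Nat.succ
theorem pv_map_shift (l : List Nat) (o : Int) :
    l.map ((fun k : Nat => o + (k : Int)) ∘ Nat.succ) = l.map (fun k : Nat => (o + 1) + (k : Int)) := by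
  apply List.map_congr_left
  intro k _
  simp only [Function.comp, Nat.succ_eq_add_one]
  push_cast
  ring

-- B's boundary filter, rephrased on plain getD indices, is pvPos
theorem pv_pos_spec (xs : List String) : ∀ (x : String) (o : Int),
    ((List.range xs.length).filter
        (fun k => !(xs.getD k "" == (x :: xs).getD k ""))).map (fun k : Nat => o + (k : Int))
      = pvPos x xs o := by
  induction xs with
  | nil => intro x o; rfl
  | cons y ys ih =>
    intro x o
    rw [List.length_cons, List.range_succ_eq_map, List.filter_cons, List.filter_map, pvPos]
    have hfilter : List.filter ((fun k => !((y :: ys).getD k "" == (x :: y :: ys).getD k "")) ∘ Nat.succ) (List.range ys.length)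
        = List.filter (fun k => !(ys.getD k "" == (y :: ys).getD k "")) (List.range ys.length) := by
      apply List.filter_congr
      intro k _
      simp [Function.comp, Nat.succ_eq_add_one]
    by_cases h : y = x
    · subst h
      simp only [List.getD_cons_zero, beq_self_eq_true, Bool.not_true, Bool.false_eq_true,
        if_false]
      rw [List.map_map, pv_map_shift, hfilter, ih y (o + 1), if_pos trivial]
    · have h0 : (!((y :: ys).getD 0 "" == (x :: y :: ys).getD 0 "")) = true := by simp [h]
      simp only [List.getD_cons_zero] at h0 ⊢
      rw [if_pos h0, if_neg h, List.map_cons, List.map_map, pv_map_shift, hfilter, ih y (o + 1)]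
      norm_num

-- the port's pyRange/pyGetD boundary filter is pvPos x xs 1
theorem pv_bounds (x : String) (xs : List String) :
    (PySem.List.pyRange 1 (PySem.List.len (x :: xs)) 1).filter
        (fun i => !(PySem.List.pyGetD (x :: xs) i "" == PySem.List.pyGetD (x :: xs) (i - 1) ""))
      = pvPos x xs 1 := by
  rw [PySem.List.pyRange_one]
  have hlen : ((PySem.List.len (x :: xs)) - 1).toNat = xs.length := by simp [PySem.List.len]
  rw [hlen, List.filter_map, ← pv_pos_spec xs x 1]
  apply congrArg
  apply List.filter_congr
  intro k hk
  have e1 : (1 : Int) + ↑k - 1 = ((k : Nat) : Int) := by ring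
  have e2 : (1 : Int) + ↑k = ((k + 1 : Nat) : Int) := by push_cast; ring
  simp only [Function.comp]
  rw [e1, e2, PySem.List.pyGetD_natCast, PySem.List.pyGetD_natCast, List.getD_cons_succ]

-- pairwise differences of the boundary list are the run lengths
theorem pvDiffs_cons_cons (a b : Int) (t : List Int) :
    pvDiffs (a :: b :: t) = (b - a) :: pvDiffs (b :: t) := by
  simp [pvDiffs]

theorem pv_diffs_spec (xs : List String) : ∀ (x : String) (o c : Int),
    pvDiffs ((o - c) :: pvPos x xs o ++ [o + (xs.length : Int)]) = pvRunLengths x c xs := by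
  induction xs with
  | nil =>
    intro x o c
    simp [pvDiffs, pvPos, pvRunLengths]
  | cons y ys ih =>
    intro x o c
    rw [pvPos, pvRunLengths]
    have e2 : o + ((y :: ys).length : Int) = (o + 1) + (ys.length : Int) := by
      push_cast [List.length_cons]; ring
    by_cases h : y = x
    · simp only [if_pos h]
      have e : o - c = (o + 1) - (c + 1) := by ring
      rw [e, e2, ih y (o + 1) (c + 1), h]
    · simp only [if_neg h]
      rw [e2]
      show pvDiffs ((o - c) :: o :: (pvPos y ys (o + 1) ++ [(o + 1) + (ys.length : Int)]))
          = c :: pvRunLengths y 1 ys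
      rw [pvDiffs_cons_cons]
      have e3 : o - (o - c) = c := by ring
      rw [e3]
      apply congrArg
      have e4 : pvDiffs (((o + 1) - 1) :: (pvPos y ys (o + 1) ++ [(o + 1) + (ys.length : Int)]))
          = pvDiffs (o :: (pvPos y ys (o + 1) ++ [(o + 1) + (ys.length : Int)])) := by
        norm_num
      rw [← e4]
      exact ih y (o + 1) 1

-- the dict comprehension over the deduped lengths has exactly Counter(lengths)'s items
theorem pv_tally (ls : List Int) :
    ((PySem.List.dedup ls).foldl
        (fun (d : PySem.Dict Int Int) L => d.insert L ((PySem.List.count ls L : Int)))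
        PySem.Dict.empty).items
      = (PySem.Dict.counter ls).items := by
  rw [PySem.Dict.items_foldl_insert_fresh (PySem.List.dedup ls) (fun L => L)
      (fun L => (PySem.List.count ls L : Int)) PySem.Dict.empty
      (fun a _ => PySem.Dict.contains_empty a)
      (by simp)]
  have hE : (PySem.Dict.empty : PySem.Dict Int Int).items = [] := rfl
  rw [hE, PySem.Dict.items_counter, PySem.List.dedup_eq_ofList]
  simp [PySem.List.count]

-- ===== VERDICT (by name: the statement is the Claim_ definition above) =====
theorem run_hist_spec : Claim_equal_run_hist := by
  intro seq _
  unfold Spec_run_hist run_hist run_hist_alt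
  cases seq with
  | nil => rfl
  | cons x xs =>
    simp only [if_neg (List.cons_ne_nil x xs)]
    -- A side
    have hA := pv_fold_adj (x :: xs) (PySem.Dict.empty, 1)
    rw [show ((x :: xs).tail = xs) from rfl] at hA
    rw [hA]
    rw [show (∀ st : PySem.Dict Int Int × Int, st.1.insert st.2 (st.1.getD st.2 0 + 1) = pvFinish st) from fun _ => rfl]
    rw [pv_main xs x 1 PySem.Dict.empty, PySem.Dict.foldl_insert_getD_add_one_eq_counter]
    -- B side
    rw [PySem.List.slice_from_one, pv_bounds x xs]
    have hlenc : PySem.List.len (x :: xs) = 1 + (xs.length : Int) := by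
      simp [PySem.List.len]
      ring
    have hedges : (0 : Int) :: pvPos x xs 1 ++ [PySem.List.len (x :: xs)]
        = ((1 : Int) - 1) :: pvPos x xs 1 ++ [1 + (xs.length : Int)] := by
      rw [hlenc]
      norm_num
    have hlens : (((0 : Int) :: pvPos x xs 1 ++ [PySem.List.len (x :: xs)]).zip
          (((0 : Int) :: pvPos x xs 1 ++ [PySem.List.len (x :: xs)]).tail)).map (fun p => p.2 - p.1)
        = pvRunLengths x 1 xs := by
      rw [show ∀ l : List Int, (l.zip l.tail).map (fun p => p.2 - p.1) = pvDiffs l from fun _ => rfl]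
      rw [hedges]
      exact pv_diffs_spec xs x 1 1
    rw [hlens, pv_tally]
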